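-- pv_equiv track=rewrite | github.com/krasgorynych/EA | NSGAII and SPEA2 collective.py | criteria1
-- ===== SOURCE A (Python) =====
-- def criteria1(len_archive, matrix_d, i, j):
--     count = 0
--     for k in range(1, len_archive):
--         if matrix_d[i][k] == matrix_d[j][k]:
--             count = count + 1
--     if count == (len_archive - 1):
--         return True
--     else:
--         return False
-- ===== SOURCE B (Python) =====
-- def criteria1(len_archive, matrix_d, i, j):
--     if len_archive <= 0:
--         return False
--     return matrix_d[i][1:len_archive] == matrix_d[j][1:len_archive]
-- ===== Notes on version B (the rewrite author's own statement) =====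
-- stated objective: simpler
-- what changed: Replaces the explicit counting loop plus final count==len_archive-1 test by a single slice-equality comparison of the two row segments matrix_d[i][1:len_archive] and matrix_d[j][1:len_archive], guarded by len_archive > 0.
-- outside the precondition, e.g. on criteria1(1, [], 0, 0): A returns True, B raises IndexError
import Mathlib
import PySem

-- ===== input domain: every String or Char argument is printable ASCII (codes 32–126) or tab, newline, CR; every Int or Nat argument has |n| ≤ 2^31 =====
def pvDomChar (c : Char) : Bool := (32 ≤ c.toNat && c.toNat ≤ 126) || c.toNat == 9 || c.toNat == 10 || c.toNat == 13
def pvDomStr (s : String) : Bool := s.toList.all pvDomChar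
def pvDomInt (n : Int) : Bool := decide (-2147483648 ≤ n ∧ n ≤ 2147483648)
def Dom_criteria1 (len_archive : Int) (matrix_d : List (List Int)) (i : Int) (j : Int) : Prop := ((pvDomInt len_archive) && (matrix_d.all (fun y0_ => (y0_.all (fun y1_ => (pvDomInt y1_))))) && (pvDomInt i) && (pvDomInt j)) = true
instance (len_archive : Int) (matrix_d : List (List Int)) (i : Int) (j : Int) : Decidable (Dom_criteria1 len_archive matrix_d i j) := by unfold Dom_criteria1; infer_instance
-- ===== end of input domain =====

-- B replaces the counting loop by a single slice-equality comparison of the two row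
-- segments (guarded by len_archive > 0); objective: simpler.

-- ===== PORT A =====
def criteria1 (len_archive : Int) (matrix_d : List (List Int)) (i : Int) (j : Int) : Bool :=
  let count : Int := (PySem.List.pyRange 1 len_archive 1).foldl
    (fun count k =>
      if PySem.List.pyGetD (PySem.List.pyGetD matrix_d i []) k 0 =
         PySem.List.pyGetD (PySem.List.pyGetD matrix_d j []) k 0
      then count + 1 else count) 0
  if count = len_archive - 1 then true else false

-- ===== PORT B =====
def criteria1_alt (len_archive : Int) (matrix_d : List (List Int)) (i : Int) (j : Int) : Bool :=
  if len_archive ≤ 0 then false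
  else decide
    (PySem.List.slice (PySem.List.pyGetD matrix_d i []) (some 1) (some len_archive) =
     PySem.List.slice (PySem.List.pyGetD matrix_d j []) (some 1) (some len_archive))

-- ===== PRECONDITION & SPEC =====
-- A raises IndexError when len_archive ≥ 2 and i/j is out of range or a selected row is
-- shorter than len_archive; those inputs are excluded. Pre_ also excludes the corner
-- len_archive = 1 with i or j out of range, where A returns True without ever touching
-- matrix_d while B's natural row lookup raises IndexError.
def Pre_criteria1 (len_archive : Int) (matrix_d : List (List Int)) (i : Int) (j : Int) : Prop :=
  1 ≤ len_archive →
    (PySem.Raise.InRange matrix_d.length i ∧ PySem.Raise.InRange matrix_d.length j ∧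
      (2 ≤ len_archive →
        len_archive ≤ ((PySem.List.pyGetD matrix_d i []).length : Int) ∧
        len_archive ≤ ((PySem.List.pyGetD matrix_d j []).length : Int)))
instance (len_archive : Int) (matrix_d : List (List Int)) (i : Int) (j : Int) : Decidable (Pre_criteria1 len_archive matrix_d i j) := by unfold Pre_criteria1; infer_instance

def pvWitness_criteria1 : Int × List (List Int) × Int × Int := (3, [[1, 2, 3], [9, 2, 3]], 0, 1)

def Spec_criteria1 (len_archive : Int) (matrix_d : List (List Int)) (i : Int) (j : Int) (out : Bool) : Prop := out = criteria1_alt len_archive matrix_d i j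
instance (len_archive : Int) (matrix_d : List (List Int)) (i : Int) (j : Int) (out : Bool) : Decidable (Spec_criteria1 len_archive matrix_d i j out) := by unfold Spec_criteria1; infer_instance

-- ===== CLAIM (what is proved, stated in full; the proofs are below) =====
def Claim_equal_criteria1 : Prop := ∀ (len_archive : Int) (matrix_d : List (List Int)) (i : Int) (j : Int), Dom_criteria1 len_archive matrix_d i j → Pre_criteria1 len_archive matrix_d i j → Spec_criteria1 len_archive matrix_d i j (criteria1 len_archive matrix_d i j)

-- ===== LEMMAS AND PROOFS =====

-- A's counting loop is a countP.
theorem foldl_if_count (p : Int → Prop) [DecidablePred p] :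
    ∀ (l : List Int) (c : Int),
      l.foldl (fun c k => if p k then c + 1 else c) c
        = c + (l.countP (fun k => decide (p k)) : Int) := by
  intro l
  induction l with
  | nil => intro c; simp
  | cons x xs ih =>
    intro c
    by_cases h : p x <;> simp [h, ih] <;> ring

theorem criteria1_spec' (len_archive : Int) (matrix_d : List (List Int)) (i j : Int)
    (hpre : Pre_criteria1 len_archive matrix_d i j) :
    criteria1 len_archive matrix_d i j = criteria1_alt len_archive matrix_d i j := by
  unfold criteria1 criteria1_alt
  by_cases hn : len_archive ≤ 0
  · -- empty range, count = 0 ≠ len_archive - 1; B's guard fires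
    rw [PySem.List.pyRange_one_eq_nil (by omega)]
    simp only [List.foldl_nil, if_pos hn]
    rw [if_neg (by omega)]
  · -- 1 ≤ len_archive
    have h1 : 1 ≤ len_archive := by omega
    obtain ⟨hi, hj, hrows⟩ := hpre h1
    set a := PySem.List.pyGetD matrix_d i [] with ha
    set b := PySem.List.pyGetD matrix_d j [] with hb
    set p : Int → Prop := fun k => PySem.List.pyGetD a k 0 = PySem.List.pyGetD b k 0 with hp
    rw [foldl_if_count p]
    rw [if_neg hn]
    rw [PySem.List.slice_toNat _ (by omega) (by omega),
        PySem.List.slice_toNat _ (by omega) (by omega)]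
    have hlen : (PySem.List.pyRange 1 len_archive 1).length = (len_archive - 1).toNat :=
      PySem.List.length_pyRange_one 1 len_archive
    -- characterise both sides as the pointwise condition on k ∈ [1, len_archive)
    have hA : (0 + ((PySem.List.pyRange 1 len_archive 1).countP
          (fun k => decide (p k)) : Int) = len_archive - 1)
        ↔ (∀ k : Int, 1 ≤ k → k < len_archive → p k) := by
      constructor
      · intro hcount k hk1 hk2
        have hcp : (PySem.List.pyRange 1 len_archive 1).countP (fun k => decide (p k))
            = (PySem.List.pyRange 1 len_archive 1).length := by omega
        have hall := List.countP_eq_length.mp hcp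
        have hmem : k ∈ PySem.List.pyRange 1 len_archive 1 :=
          (PySem.List.mem_pyRange_one).mpr ⟨hk1, hk2⟩
        simpa using hall k hmem
      · intro hall
        have : (PySem.List.pyRange 1 len_archive 1).countP (fun k => decide (p k))
            = (PySem.List.pyRange 1 len_archive 1).length := by
          apply List.countP_eq_length.mpr
          intro k hk
          obtain ⟨hk1, hk2⟩ := (PySem.List.mem_pyRange_one).mp hk
          simpa using hall k hk1 hk2
        rw [this, hlen]; omega
    have hB : ((a.drop 1).take (len_archive.toNat - 1) = (b.drop 1).take (len_archive.toNat - 1))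
        ↔ (∀ k : Int, 1 ≤ k → k < len_archive → p k) := by
      by_cases h2 : 2 ≤ len_archive
      · obtain ⟨hla, hlb⟩ := hrows h2
        have hlena : ((a.drop 1).take (len_archive.toNat - 1)).length = len_archive.toNat - 1 := by
          simp only [List.length_take, List.length_drop]; omega
        have hlenb : ((b.drop 1).take (len_archive.toNat - 1)).length = len_archive.toNat - 1 := by
          simp only [List.length_take, List.length_drop]; omega
        constructor
        · intro heq k hk1 hk2
          have hk2' : k.toNat < len_archive.toNat := by omega
          have hm : k.toNat - 1 < len_archive.toNat - 1 := by omega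
          have := congrArg (fun l => l[k.toNat - 1]?) heq
          simp only [List.getElem?_take, List.getElem?_drop] at this
          rw [if_pos hm, if_pos hm] at this
          have hia : 1 + (k.toNat - 1) < a.length := by omega
          have hib : 1 + (k.toNat - 1) < b.length := by omega
          rw [List.getElem?_eq_getElem hia, List.getElem?_eq_getElem hib] at this
          have hval : a[1 + (k.toNat - 1)] = b[1 + (k.toNat - 1)] := by
            exact Option.some_injective _ this
          show PySem.List.pyGetD a k 0 = PySem.List.pyGetD b k 0
          rw [PySem.List.pyGetD_eq_getElem a 0 (by omega) (by omega),
              PySem.List.pyGetD_eq_getElem b 0 (by omega) (by omega)]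
          have he2 : 1 + (k.toNat - 1) = k.toNat := by omega
          simp only [he2] at hval
          exact hval
        · intro hall
          apply List.ext_getElem (by omega)
          intro m hm hm'
          simp only [List.getElem_take, List.getElem_drop]
          have hk : p ((m : Int) + 1) := by
            apply hall ((m : Int) + 1) (by omega)
            simp only [List.length_take, List.length_drop] at hm; omega
          have hma : 1 + m < a.length := by
            simp only [List.length_take, List.length_drop] at hm; omega
          have hmb : 1 + m < b.length := by
            simp only [List.length_take, List.length_drop] at hm; omega
          have hk' : PySem.List.pyGetD a ((m : Int) + 1) 0 = PySem.List.pyGetD b ((m : Int) + 1) 0 := hk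
          rw [PySem.List.pyGetD_eq_getElem a 0 (by omega) (by omega),
              PySem.List.pyGetD_eq_getElem b 0 (by omega) (by omega)] at hk'
          have he : ((m : Int) + 1).toNat = 1 + m := by omega
          simp only [he] at hk'
          exact hk'
      · -- len_archive = 1: both empty slices, vacuous condition
        have : len_archive = 1 := by omega
        subst this
        simp only [show (1 : Int).toNat - 1 = 0 from rfl, List.take_zero]
        constructor
        · intro _ k hk1 hk2; omega
        · intro _; trivial
    show (if (0 + ((PySem.List.pyRange 1 len_archive 1).countP (fun k => decide (p k)) : Int)
          = len_archive - 1) then true else false)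
        = decide (List.take (len_archive.toNat - 1) (List.drop 1 a)
                = List.take (len_archive.toNat - 1) (List.drop 1 b))
    by_cases hc : List.take (len_archive.toNat - 1) (List.drop 1 a)
        = List.take (len_archive.toNat - 1) (List.drop 1 b)
    · rw [if_pos (hA.mpr (hB.mp hc))]
      exact (decide_eq_true hc).symm
    · rw [if_neg (fun h => hc (hB.mpr (hA.mp h)))]
      exact (decide_eq_false hc).symm

-- ===== VERDICT (by name: the statement is the Claim_ definition above) =====
theorem criteria1_spec : Claim_equal_criteria1 := by
  intro len_archive matrix_d i j _ hpre
  exact criteria1_spec' len_archive matrix_d i j hpre
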